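-- pv_equiv track=rewrite | github.com/mostfamoh/tp | crypto_lab/views.py | decode_message_from_text
-- ===== SOURCE A (Python) =====
-- def bits_to_text(bits):
--     """Convertit une chaîne binaire en texte (8 bits = 1 caractère)."""
--     chars = [bits[i:i+8] for i in range(0, len(bits), 8)]
--     return ''.join(chr(int(b, 2)) for b in chars)
--
-- def decode_message_from_text(stego_text, bit_length):
--     """Extrait les bits selon la casse, puis reconvertit en texte."""
--     bits = []
--     for c in stego_text:
--         if c.isalpha():
--             bits.append('1' if c.isupper() else '0')
--         if len(bits) >= bit_length:
--             break
--     return bits_to_text(''.join(bits))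
-- ===== SOURCE B (Python) =====
-- def decode_message_from_text(stego_text, bit_length):
--     out = []
--     acc = 0
--     n = 0       # bits in the current (partial) byte
--     total = 0   # bits collected overall
--     for c in stego_text:
--         if c.isalpha():
--             acc = acc * 2 + (1 if c.isupper() else 0)
--             n += 1
--             total += 1
--             if n == 8:
--                 out.append(chr(acc))
--                 acc = 0
--                 n = 0
--         if total >= bit_length:
--             break
--     if n > 0:
--         out.append(chr(acc))
--     return ''.join(out)
-- ===== Notes on version B (the rewrite author's own statement) =====
-- stated objective: alternative
-- what changed: Replaces the two-phase bit-string pipeline (build a list of '0'/'1' characters, join it, re-chunk it into 8-character substrings, parse each with int(b,2)) by a single pass that accumulates each case bit arithmetically into a byte accumulator and emits chr(acc) whenever 8 bits are full, handling the trailing partial byte directly.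
import Mathlib
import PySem

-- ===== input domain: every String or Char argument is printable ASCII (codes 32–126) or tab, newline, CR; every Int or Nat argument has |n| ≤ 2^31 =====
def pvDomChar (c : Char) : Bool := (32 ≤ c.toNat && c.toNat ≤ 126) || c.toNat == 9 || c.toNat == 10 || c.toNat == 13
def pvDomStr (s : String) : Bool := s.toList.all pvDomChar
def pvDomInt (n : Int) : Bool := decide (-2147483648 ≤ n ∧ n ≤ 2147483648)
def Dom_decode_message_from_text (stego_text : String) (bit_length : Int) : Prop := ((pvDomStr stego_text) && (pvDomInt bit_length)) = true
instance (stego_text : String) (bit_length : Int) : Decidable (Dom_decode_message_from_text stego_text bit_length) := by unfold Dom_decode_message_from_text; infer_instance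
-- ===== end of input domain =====

-- B replaces A's bit-string build / re-chunk / int(b,2) pipeline by one arithmetic
-- accumulator pass emitting a char every 8 bits (alternative single-pass decomposition).

-- ===== PORT A =====
-- int(b, 2): hand port, exact on strings of '0'/'1' digits (the only strings A passes to it)
def pvInt2 (b : List Char) : Int := b.foldl (fun a c => a * 2 + (if c = '1' then 1 else 0)) 0

-- [bits[i:i+8] for i in range(0, len(bits), 8)]: hand port of the step-8 range
-- comprehension as the obvious index recursion i = 0, 8, 16, … while i < len(bits); exact.
def pvChunksA (bits : List Char) (i : Nat) : List (List Char) :=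
  if h : i < bits.length then
    PySem.List.slice bits (some (i : Int)) (some ((i : Int) + 8)) :: pvChunksA bits (i + 8)
  else []
termination_by bits.length - i

def bits_to_text (bits : List Char) : List Char :=
  (pvChunksA bits 0).map (fun b => Char.ofNat (pvInt2 b).toNat)

def pvLoopA (cs : List Char) (bl : Int) (bits : List Char) : List Char :=
  match cs with
  | [] => bits
  | c :: rest =>
      let bits' := if PySem.Chars.isalpha c then
                     bits ++ [if PySem.Chars.isupper c then '1' else '0']
                   else bits
      if bl ≤ (bits'.length : Int) then bits' else pvLoopA rest bl bits'

def decode_message_from_text (stego_text : String) (bit_length : Int) : String :=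
  String.mk (bits_to_text (pvLoopA stego_text.toList bit_length []))

-- ===== PORT B =====
def pvLoopB (cs : List Char) (bl : Int) (out : List Char) (acc n total : Nat) :
    List Char × Nat × Nat :=
  match cs with
  | [] => (out, acc, n)
  | c :: rest =>
      let st :=
        if PySem.Chars.isalpha c then
          let acc' := acc * 2 + (if PySem.Chars.isupper c then 1 else 0)
          if n + 1 = 8 then (out ++ [Char.ofNat acc'], 0, 0, total + 1)
          else (out, acc', n + 1, total + 1)
        else (out, acc, n, total)
      if bl ≤ (st.2.2.2 : Int) then (st.1, st.2.1, st.2.2.1)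
      else pvLoopB rest bl st.1 st.2.1 st.2.2.1 st.2.2.2

def decode_message_from_text_alt (stego_text : String) (bit_length : Int) : String :=
  let r := pvLoopB stego_text.toList bit_length [] 0 0 0
  String.mk (if r.2.2 > 0 then r.1 ++ [Char.ofNat r.2.1] else r.1)

-- ===== PRECONDITION & SPEC =====
def Spec_decode_message_from_text (stego_text : String) (bit_length : Int) (out : String) : Prop := out = decode_message_from_text_alt stego_text bit_length
instance (stego_text : String) (bit_length : Int) (out : String) : Decidable (Spec_decode_message_from_text stego_text bit_length out) := by unfold Spec_decode_message_from_text; infer_instance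

-- ===== CLAIM (what is proved, stated in full; the proofs are below) =====
def Claim_equal_decode_message_from_text : Prop := ∀ (stego_text : String) (bit_length : Int), Dom_decode_message_from_text stego_text bit_length → Spec_decode_message_from_text stego_text bit_length (decode_message_from_text stego_text bit_length)

-- ===== LEMMAS AND PROOFS =====

-- value of a bit-char list (Nat version of pvInt2)
def pvVal (b : List Char) : Nat := b.foldl (fun a c => a * 2 + (if c = '1' then 1 else 0)) 0

-- decoded full bytes of a bit list
def pvDecFull (b : List Char) : List Char :=
  if 8 ≤ b.length then Char.ofNat (pvVal (b.take 8)) :: pvDecFull (b.drop 8) else []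
termination_by b.length
decreasing_by simp_all; omega

-- trailing partial byte of a bit list
def pvLastPart (b : List Char) : List Char :=
  if 8 ≤ b.length then pvLastPart (b.drop 8) else b
termination_by b.length
decreasing_by simp_all; omega

theorem pvInt2_eq_val (b : List Char) : pvInt2 b = (pvVal b : Int) := by
  unfold pvInt2 pvVal
  suffices h : ∀ (a : Nat),
      b.foldl (fun a c => a * 2 + (if c = '1' then 1 else 0)) (a : Int)
        = ((b.foldl (fun a c => a * 2 + (if c = '1' then 1 else 0)) a : Nat) : Int) by
    exact h 0
  induction b with
  | nil => intro a; simp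
  | cons c rest ih =>
      intro a
      simp only [List.foldl_cons]
      rw [show ((a : Int) * 2 + (if c = '1' then 1 else 0))
            = ((a * 2 + (if c = '1' then 1 else 0) : Nat) : Int) by push_cast; split <;> simp]
      exact ih _

theorem pvVal_append_bit (b : List Char) (c : Char) :
    pvVal (b ++ [c]) = pvVal b * 2 + (if c = '1' then 1 else 0) := by
  unfold pvVal; rw [List.foldl_append]; simp

-- unfolding helpers for the well-founded definitions
theorem pvDecFull_large {b : List Char} (h : 8 ≤ b.length) :
    pvDecFull b = Char.ofNat (pvVal (b.take 8)) :: pvDecFull (b.drop 8) := by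
  rw [pvDecFull, if_pos h]

theorem pvDecFull_small {b : List Char} (h : ¬ 8 ≤ b.length) : pvDecFull b = [] := by
  rw [pvDecFull, if_neg h]

theorem pvLastPart_large {b : List Char} (h : 8 ≤ b.length) :
    pvLastPart b = pvLastPart (b.drop 8) := by
  rw [pvLastPart, if_pos h]

theorem pvLastPart_small {b : List Char} (h : ¬ 8 ≤ b.length) : pvLastPart b = b := by
  rw [pvLastPart, if_neg h]

-- chunk list of a bit list, forward 8 at a time
def pvChunks0 (l : List Char) : List (List Char) :=
  if l = [] then [] else l.take 8 :: pvChunks0 (l.drop 8)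
termination_by l.length
decreasing_by rename_i h; have : 0 < l.length := List.length_pos_iff.mpr h; simp; omega

theorem pvChunks0_nil : pvChunks0 [] = [] := by rw [pvChunks0, if_pos rfl]

theorem pvChunks0_cons {l : List Char} (h : l ≠ []) :
    pvChunks0 l = l.take 8 :: pvChunks0 (l.drop 8) := by rw [pvChunks0, if_neg h]

theorem pvChunksA_eq (bits : List Char) (i : Nat) :
    pvChunksA bits i = pvChunks0 (bits.drop i) := by
  by_cases h : i < bits.length
  · rw [pvChunksA, dif_pos h,
      pvChunks0_cons (by simp [List.drop_eq_nil_iff]; omega)]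
    have hs : PySem.List.slice bits (some (i : Int)) (some ((i : Int) + 8))
        = (bits.drop i).take 8 := by
      have := PySem.List.slice_natCast_add bits i 8
      simpa using this
    rw [hs, pvChunksA_eq bits (i + 8)]
    simp [List.drop_drop]
  · rw [pvChunksA, dif_neg h,
      pvChunks0, if_pos (by simp [List.drop_eq_nil_iff]; omega)]
termination_by bits.length - i
decreasing_by omega

-- bits_to_text as decoded full bytes plus the trailing partial byte
theorem pvB2T_eq (b : List Char) :
    bits_to_text b
      = pvDecFull b ++ (if b.length % 8 ≠ 0 then [Char.ofNat (pvVal (pvLastPart b))] else []) := by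
  rw [bits_to_text, pvChunksA_eq, List.drop_zero]
  induction hb : b.length using Nat.strong_induction_on generalizing b with
  | _ n ih =>
  subst hb
  by_cases hnil : b = []
  · subst hnil
    rw [pvChunks0_nil, pvDecFull_small (by simp)]
    simp
  · rw [pvChunks0_cons hnil]
    by_cases h8 : 8 ≤ b.length
    · rw [pvDecFull_large h8, pvLastPart_large h8]
      have hlen : (b.drop 8).length < b.length := by simp; omega
      have hih := ih (b.drop 8).length hlen (b.drop 8) rfl
      have hmod : (b.drop 8).length % 8 = b.length % 8 := by simp; omega
      rw [hmod] at hih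
      simp only [List.map_cons, pvInt2_eq_val, Int.toNat_natCast, List.cons_append]
      exact congrArg (List.cons _) (by simpa [pvInt2_eq_val] using hih)
    · rw [pvDecFull_small h8, pvLastPart_small h8]
      have hd : b.drop 8 = [] := by simp [List.drop_eq_nil_iff]; omega
      have ht : b.take 8 = b := List.take_of_length_le (by omega)
      have hm : b.length % 8 ≠ 0 := by
        have : 0 < b.length := List.length_pos_iff.mpr hnil
        omega
      rw [hd, pvChunks0_nil, ht]
      simp [pvInt2_eq_val, hm]

-- appending a bit when the byte does not fill
theorem pvDec_append_lt (b : List Char) (c : Char) (h : (b.length + 1) % 8 ≠ 0) :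
    pvDecFull (b ++ [c]) = pvDecFull b ∧ pvLastPart (b ++ [c]) = pvLastPart b ++ [c] := by
  induction hb : b.length using Nat.strong_induction_on generalizing b with
  | _ n ih =>
  subst hb
  by_cases h8 : 8 ≤ b.length
  · have ht : (b ++ [c]).take 8 = b.take 8 := List.take_append_of_le_length h8
    have hd : (b ++ [c]).drop 8 = b.drop 8 ++ [c] := List.drop_append_of_le_length h8
    have hlen : (b.drop 8).length < b.length := by simp; omega
    have hmod : ((b.drop 8).length + 1) % 8 ≠ 0 := by simp; omega
    obtain ⟨ih1, ih2⟩ := ih (b.drop 8).length hlen (b.drop 8) hmod rfl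
    constructor
    · rw [pvDecFull_large (b := b ++ [c]) (by simp; omega), ht, hd, ih1,
        pvDecFull_large h8]
    · rw [pvLastPart_large (b := b ++ [c]) (by simp; omega), hd, ih2,
        pvLastPart_large h8]
  · have hlt : b.length + 1 < 8 := by omega
    constructor
    · rw [pvDecFull_small (b := b ++ [c]) (by simp; omega), pvDecFull_small h8]
    · rw [pvLastPart_small (b := b ++ [c]) (by simp; omega), pvLastPart_small h8]

-- appending a bit that fills a byte
theorem pvDec_append_eq (b : List Char) (c : Char) (h : (b.length + 1) % 8 = 0) :
    pvDecFull (b ++ [c]) = pvDecFull b ++ [Char.ofNat (pvVal (pvLastPart b ++ [c]))]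
      ∧ pvLastPart (b ++ [c]) = [] := by
  induction hb : b.length using Nat.strong_induction_on generalizing b with
  | _ n ih =>
  subst hb
  by_cases h8 : 8 ≤ b.length
  · have ht : (b ++ [c]).take 8 = b.take 8 := List.take_append_of_le_length h8
    have hd : (b ++ [c]).drop 8 = b.drop 8 ++ [c] := List.drop_append_of_le_length h8
    have hlen : (b.drop 8).length < b.length := by simp; omega
    have hmod : ((b.drop 8).length + 1) % 8 = 0 := by simp; omega
    obtain ⟨ih1, ih2⟩ := ih (b.drop 8).length hlen (b.drop 8) hmod rfl
    constructor
    · rw [pvDecFull_large (b := b ++ [c]) (by simp; omega), ht, hd, ih1,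
        pvDecFull_large h8, pvLastPart_large h8]
      simp
    · rw [pvLastPart_large (b := b ++ [c]) (by simp; omega), hd, ih2]
  · have h7 : b.length = 7 := by omega
    have ht : (b ++ [c]).take 8 = b ++ [c] := List.take_of_length_le (by simp; omega)
    have hd : (b ++ [c]).drop 8 = [] := by simp [List.drop_eq_nil_iff]; omega
    constructor
    · rw [pvDecFull_large (b := b ++ [c]) (by simp; omega), ht, hd,
        pvDecFull_small (by simp), pvDecFull_small h8, pvLastPart_small h8]
      simp
    · rw [pvLastPart_large (b := b ++ [c]) (by simp; omega), hd,
        pvLastPart_small (by simp)]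

-- main loop invariant: B's state is determined by A's collected bit list
theorem pvLoop_inv (cs : List Char) (bl : Int) (b : List Char) :
    pvLoopB cs bl (pvDecFull b) (pvVal (pvLastPart b)) (b.length % 8) b.length
      = (pvDecFull (pvLoopA cs bl b), pvVal (pvLastPart (pvLoopA cs bl b)),
         (pvLoopA cs bl b).length % 8) := by
  induction cs generalizing b with
  | nil => rfl
  | cons c rest ih =>
    rw [pvLoopB, pvLoopA]
    by_cases ha : PySem.Chars.isalpha c = true
    · set bit : Char := if PySem.Chars.isupper c then '1' else '0' with hbit
      have hacc : pvVal (pvLastPart b) * 2 + (if PySem.Chars.isupper c then 1 else 0)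
          = pvVal (pvLastPart b ++ [bit]) := by
        rw [pvVal_append_bit, hbit]
        by_cases hu : PySem.Chars.isupper c = true <;> simp [hu]
      by_cases hfull : b.length % 8 + 1 = 8
      · have hm : (b.length + 1) % 8 = 0 := by omega
        obtain ⟨he1, he2⟩ := pvDec_append_eq b bit hm
        simp only [ha, if_true, if_pos hfull, hacc]
        by_cases hbrk : bl ≤ ((b.length + 1 : Nat) : Int)
        · rw [if_pos (by push_cast; simpa using hbrk),
            if_pos (by simp [ha, hbit]; push_cast; omega)]
          simp [ha, ← hbit, he1, he2, hm, pvVal]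
        · rw [if_neg (by push_cast; simpa using hbrk),
            if_neg (by simp [ha, hbit]; push_cast; omega)]
          have hih := ih (b ++ [bit])
          simp only [he1, he2, List.length_append, List.length_cons,
            List.length_nil, hm] at hih
          simpa [pvVal] using hih
      · have hm : (b.length + 1) % 8 ≠ 0 := by omega
        obtain ⟨he1, he2⟩ := pvDec_append_lt b bit hm
        simp only [ha, if_true, if_neg hfull, hacc]
        by_cases hbrk : bl ≤ ((b.length + 1 : Nat) : Int)
        · rw [if_pos (by push_cast; simpa using hbrk),
            if_pos (by simp [ha, hbit]; push_cast; omega)]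
          simp [ha, ← hbit, he1, he2]
          omega
        · rw [if_neg (by push_cast; simpa using hbrk),
            if_neg (by simp [ha, hbit]; push_cast; omega)]
          have hih := ih (b ++ [bit])
          simp only [he1, he2, List.length_append, List.length_cons,
            List.length_nil] at hih
          have hmod : (b.length + 1) % 8 = b.length % 8 + 1 := by omega
          simpa [hmod] using hih
    · simp only [ha, Bool.false_eq_true, if_false]
      by_cases hbrk : bl ≤ ((b.length : Nat) : Int)
      · simp only [if_pos hbrk, if_pos hbrk]
      · simp only [if_neg hbrk]
        exact ih b

-- ===== VERDICT (by name: the statement is the Claim_ definition above) =====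
theorem decode_message_from_text_spec : Claim_equal_decode_message_from_text := by
  intro s bl _
  unfold Spec_decode_message_from_text decode_message_from_text decode_message_from_text_alt
  have h0f : pvDecFull [] = [] := pvDecFull_small (by simp)
  have h0l : pvLastPart [] = [] := pvLastPart_small (by simp)
  have h := pvLoop_inv s.toList bl []
  rw [h0f, h0l] at h
  simp only [List.length_nil, Nat.zero_mod, pvVal, List.foldl_nil] at h
  rw [h, pvB2T_eq]
  by_cases hm : (pvLoopA s.toList bl []).length % 8 = 0
  · simp [hm]
  · simp [hm, Nat.pos_of_ne_zero hm, pvVal]
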